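-- pv_equiv track=rewrite | github.com/wburns02/permit-api | app/api/v1/contractors.py | _license_status_score
-- ===== SOURCE A (Python) =====
-- def _license_status_score(statuses: list[str | None]) -> tuple[int, str]:
--     """
--     Score based on best license found.
--     CLEAR/Active = 0, Expired = 50, Suspended/Revoked = 100, No license = 75.
--     Returns (score, description).
--     """
--     if not statuses:
--         return 75, "No license found"
--
--     normalized = [s.upper().strip() if s else "" for s in statuses]
--
--     # Check for best-case first
--     active_terms = {"CLEAR", "ACTIVE", "CURRENT", "VALID"}
--     if any(term in st for st in normalized for term in active_terms):
--         return 0, "Active/Clear license on file"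
--
--     expired_terms = {"EXPIRED", "INACTIVE", "LAPSED"}
--     if any(term in st for st in normalized for term in expired_terms):
--         return 50, "License expired or inactive"
--
--     bad_terms = {"SUSPENDED", "REVOKED", "CANCELLED", "DENIED"}
--     if any(term in st for st in normalized for term in bad_terms):
--         return 100, "License suspended or revoked"
--
--     # Unknown status — treat with moderate caution
--     return 60, f"License status unclear ({statuses[0]})"
-- ===== SOURCE B (Python) =====
-- def _license_status_score(statuses):
--     """Single pass: rank each status (0 active, 1 expired, 2 bad, 3 unknown),
--     keep the minimum rank with early exit on 0, then map the rank to a result."""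
--     if not statuses:
--         return 75, "No license found"
--
--     def rank(st):
--         if any(t in st for t in ("CLEAR", "ACTIVE", "CURRENT", "VALID")):
--             return 0
--         if any(t in st for t in ("EXPIRED", "INACTIVE", "LAPSED")):
--             return 1
--         if any(t in st for t in ("SUSPENDED", "REVOKED", "CANCELLED", "DENIED")):
--             return 2
--         return 3
--
--     best = 3
--     for s in statuses:
--         r = rank(s.upper().strip() if s else "")
--         if r < best:
--             best = r
--             if best == 0:
--                 break
--
--     if best == 0:
--         return 0, "Active/Clear license on file"
--     if best == 1:
--         return 50, "License expired or inactive"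
--     if best == 2:
--         return 100, "License suspended or revoked"
--     return 60, f"License status unclear ({statuses[0]})"
-- ===== Notes on version B (the rewrite author's own statement) =====
-- stated objective: alternative
-- what changed: Replaces A's three separate any-scans over the normalized list by a single pass that assigns each status a category rank (0 active, 1 expired, 2 bad, 3 unknown), keeps the running minimum rank with an early break on rank 0, and maps the final rank to the result.
import Mathlib
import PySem

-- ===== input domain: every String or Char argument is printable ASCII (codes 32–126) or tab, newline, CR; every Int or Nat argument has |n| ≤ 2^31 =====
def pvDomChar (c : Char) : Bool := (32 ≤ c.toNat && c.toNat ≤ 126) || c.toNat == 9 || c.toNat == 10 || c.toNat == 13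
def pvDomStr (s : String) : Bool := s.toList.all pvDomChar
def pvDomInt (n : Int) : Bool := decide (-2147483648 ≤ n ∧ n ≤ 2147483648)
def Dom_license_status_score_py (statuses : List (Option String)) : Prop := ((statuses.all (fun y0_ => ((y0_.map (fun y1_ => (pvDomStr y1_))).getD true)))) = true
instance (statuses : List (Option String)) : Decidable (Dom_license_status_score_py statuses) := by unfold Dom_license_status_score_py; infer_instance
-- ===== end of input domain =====

-- B is a single pass keeping the minimum category rank (with early exit) instead of A's
-- three separate `any` scans over the normalized list; same return value everywhere (alternative decomposition).

-- shared helpers (the same term sets / normalization / str() both Pythons use)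
def pvNorm (s : Option String) : String :=
  match s with
  | none => ""
  | some t => if t = "" then "" else PySem.Str.strip (PySem.Str.upper t)

def pvShowOpt (s : Option String) : String :=
  match s with
  | none => "None"
  | some t => t

def pvActiveTerms : List String := ["CLEAR", "ACTIVE", "CURRENT", "VALID"]
def pvExpiredTerms : List String := ["EXPIRED", "INACTIVE", "LAPSED"]
def pvBadTerms : List String := ["SUSPENDED", "REVOKED", "CANCELLED", "DENIED"]

-- ===== PORT A =====
def license_status_score_py (statuses : List (Option String)) : Int × String :=
  if statuses = [] then (75, "No license found")
  else
    let normalized := statuses.map pvNorm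
    if normalized.any (fun st => pvActiveTerms.any (fun term => PySem.Str.isIn term st)) then
      (0, "Active/Clear license on file")
    else if normalized.any (fun st => pvExpiredTerms.any (fun term => PySem.Str.isIn term st)) then
      (50, "License expired or inactive")
    else if normalized.any (fun st => pvBadTerms.any (fun term => PySem.Str.isIn term st)) then
      (100, "License suspended or revoked")
    else
      (60, "License status unclear (" ++ pvShowOpt (statuses.headD none) ++ ")")

-- ===== PORT B =====
def pvRank (st : String) : Nat :=
  if pvActiveTerms.any (fun t => PySem.Str.isIn t st) then 0
  else if pvExpiredTerms.any (fun t => PySem.Str.isIn t st) then 1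
  else if pvBadTerms.any (fun t => PySem.Str.isIn t st) then 2
  else 3

-- the `for` loop with its early `break` on best = 0
def pvBestLoop (l : List (Option String)) (best : Nat) : Nat :=
  match l with
  | [] => best
  | s :: rest =>
    let r := pvRank (pvNorm s)
    if r < best then
      if r = 0 then 0 else pvBestLoop rest r
    else pvBestLoop rest best

def license_status_score_py_alt (statuses : List (Option String)) : Int × String :=
  if statuses = [] then (75, "No license found")
  else
    let best := pvBestLoop statuses 3
    if best = 0 then (0, "Active/Clear license on file")
    else if best = 1 then (50, "License expired or inactive")
    else if best = 2 then (100, "License suspended or revoked")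
    else (60, "License status unclear (" ++ pvShowOpt (statuses.headD none) ++ ")")

-- ===== PRECONDITION & SPEC =====
def Spec_license_status_score_py (statuses : List (Option String)) (out : Int × String) : Prop := out = license_status_score_py_alt statuses
instance (statuses : List (Option String)) (out : Int × String) : Decidable (Spec_license_status_score_py statuses out) := by unfold Spec_license_status_score_py; infer_instance

-- ===== CLAIM (what is proved, stated in full; the proofs are below) =====
def Claim_equal_license_status_score_py : Prop := ∀ (statuses : List (Option String)), Dom_license_status_score_py statuses → Spec_license_status_score_py statuses (license_status_score_py statuses)

-- ===== LEMMAS AND PROOFS =====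

-- after the early break the remaining fold of min from 0 stays 0
lemma foldl_min_zero (l : List (Option String)) :
    l.foldl (fun a s => min a (pvRank (pvNorm s))) 0 = 0 := by
  induction l with
  | nil => rfl
  | cons s rest ih => simpa [List.foldl] using ih

-- the loop computes a left fold of min over the ranks (the early break is sound)
lemma pvBestLoop_eq_foldl (l : List (Option String)) (b : Nat) :
    pvBestLoop l b = l.foldl (fun a s => min a (pvRank (pvNorm s))) b := by
  induction l generalizing b with
  | nil => rfl
  | cons s rest ih =>
    simp only [pvBestLoop, List.foldl]
    by_cases h : pvRank (pvNorm s) < b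
    · rw [if_pos h]
      by_cases h0 : pvRank (pvNorm s) = 0
      · rw [if_pos h0]
        have hmin : min b (pvRank (pvNorm s)) = 0 := by omega
        rw [hmin]
        exact (foldl_min_zero rest).symm
      · rw [if_neg h0, ih]
        have hmin : min b (pvRank (pvNorm s)) = pvRank (pvNorm s) := by omega
        rw [hmin]
    · rw [if_neg h, ih]
      have hmin : min b (pvRank (pvNorm s)) = b := by omega
      rw [hmin]

lemma foldl_min_le_init (l : List (Option String)) (b : Nat) :
    l.foldl (fun a s => min a (pvRank (pvNorm s))) b ≤ b := by
  induction l generalizing b with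
  | nil => exact le_refl _
  | cons s rest ih => exact le_trans (ih _) (Nat.min_le_left _ _)

lemma foldl_min_le_of_mem {l : List (Option String)} {x : Option String} (hx : x ∈ l) (b : Nat) :
    l.foldl (fun a s => min a (pvRank (pvNorm s))) b ≤ pvRank (pvNorm x) := by
  induction l generalizing b with
  | nil => cases hx
  | cons s rest ih =>
    rcases List.mem_cons.mp hx with h | h
    · subst h
      exact le_trans (foldl_min_le_init rest _) (Nat.min_le_right _ _)
    · exact ih h _

lemma le_foldl_min {l : List (Option String)} {k b : Nat}
    (hall : ∀ x ∈ l, k ≤ pvRank (pvNorm x)) (hb : k ≤ b) :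
    k ≤ l.foldl (fun a s => min a (pvRank (pvNorm s))) b := by
  induction l generalizing b with
  | nil => exact hb
  | cons s rest ih =>
    exact ih (fun x hx => hall x (List.mem_cons_of_mem _ hx))
      (le_min hb (hall s (List.mem_cons_self)))

-- ===== VERDICT (by name: the statement is the Claim_ definition above) =====
theorem license_status_score_py_spec : Claim_equal_license_status_score_py := by
  intro statuses _
  unfold Spec_license_status_score_py
  simp only [license_status_score_py, license_status_score_py_alt]
  by_cases hnil : statuses = []
  · rw [if_pos hnil, if_pos hnil]
  · rw [if_neg hnil, if_neg hnil, pvBestLoop_eq_foldl]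
    by_cases hA : ((statuses.map pvNorm).any fun st => pvActiveTerms.any fun term => PySem.Str.isIn term st) = true
    · -- an active term occurs: some rank is 0, so the fold is 0
      obtain ⟨st, hst, hterm⟩ := List.any_eq_true.mp hA
      obtain ⟨x, hx, hxeq⟩ := List.mem_map.mp hst
      have hr0 : pvRank (pvNorm x) = 0 := by
        unfold pvRank; rw [hxeq, if_pos hterm]
      have hF0 : statuses.foldl (fun a s => min a (pvRank (pvNorm s))) 3 = 0 :=
        Nat.le_zero.mp (hr0 ▸ foldl_min_le_of_mem hx 3)
      rw [if_pos hA, if_pos hF0]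
    · have hAx : ∀ x ∈ statuses, ¬ (pvActiveTerms.any fun term => PySem.Str.isIn term (pvNorm x)) = true := by
        intro x hx h
        exact hA (List.any_eq_true.mpr ⟨pvNorm x, List.mem_map.mpr ⟨x, hx, rfl⟩, h⟩)
      have hno0 : ∀ x ∈ statuses, 1 ≤ pvRank (pvNorm x) := by
        intro x hx
        unfold pvRank; rw [if_neg (hAx x hx)]
        split
        · omega
        · split <;> omega
      have hge1 : 1 ≤ statuses.foldl (fun a s => min a (pvRank (pvNorm s))) 3 :=
        le_foldl_min hno0 (by omega)
      by_cases hB : ((statuses.map pvNorm).any fun st => pvExpiredTerms.any fun term => PySem.Str.isIn term st) = true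
      · obtain ⟨st, hst, hterm⟩ := List.any_eq_true.mp hB
        obtain ⟨x, hx, hxeq⟩ := List.mem_map.mp hst
        rw [← hxeq] at hterm
        have hr1 : pvRank (pvNorm x) = 1 := by
          unfold pvRank; rw [if_neg (hAx x hx), if_pos hterm]
        have hle : statuses.foldl (fun a s => min a (pvRank (pvNorm s))) 3 ≤ 1 :=
          hr1 ▸ foldl_min_le_of_mem hx 3
        have hF1 : statuses.foldl (fun a s => min a (pvRank (pvNorm s))) 3 = 1 := by omega
        rw [if_neg hA, if_pos hB, if_neg (by omega : ¬ statuses.foldl (fun a s => min a (pvRank (pvNorm s))) 3 = 0), if_pos hF1]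
      · have hBx : ∀ x ∈ statuses, ¬ (pvExpiredTerms.any fun term => PySem.Str.isIn term (pvNorm x)) = true := by
          intro x hx h
          exact hB (List.any_eq_true.mpr ⟨pvNorm x, List.mem_map.mpr ⟨x, hx, rfl⟩, h⟩)
        have hno1 : ∀ x ∈ statuses, 2 ≤ pvRank (pvNorm x) := by
          intro x hx
          unfold pvRank; rw [if_neg (hAx x hx), if_neg (hBx x hx)]
          split <;> omega
        have hge2 : 2 ≤ statuses.foldl (fun a s => min a (pvRank (pvNorm s))) 3 :=
          le_foldl_min hno1 (by omega)
        by_cases hC : ((statuses.map pvNorm).any fun st => pvBadTerms.any fun term => PySem.Str.isIn term st) = true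
        · obtain ⟨st, hst, hterm⟩ := List.any_eq_true.mp hC
          obtain ⟨x, hx, hxeq⟩ := List.mem_map.mp hst
          rw [← hxeq] at hterm
          have hr2 : pvRank (pvNorm x) = 2 := by
            unfold pvRank; rw [if_neg (hAx x hx), if_neg (hBx x hx), if_pos hterm]
          have hle : statuses.foldl (fun a s => min a (pvRank (pvNorm s))) 3 ≤ 2 :=
            hr2 ▸ foldl_min_le_of_mem hx 3
          have hF2 : statuses.foldl (fun a s => min a (pvRank (pvNorm s))) 3 = 2 := by omega
          rw [if_neg hA, if_neg hB, if_pos hC,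
            if_neg (by omega : ¬ statuses.foldl (fun a s => min a (pvRank (pvNorm s))) 3 = 0),
            if_neg (by omega : ¬ statuses.foldl (fun a s => min a (pvRank (pvNorm s))) 3 = 1), if_pos hF2]
        · have hCx : ∀ x ∈ statuses, ¬ (pvBadTerms.any fun term => PySem.Str.isIn term (pvNorm x)) = true := by
            intro x hx h
            exact hC (List.any_eq_true.mpr ⟨pvNorm x, List.mem_map.mpr ⟨x, hx, rfl⟩, h⟩)
          have hno2 : ∀ x ∈ statuses, 3 ≤ pvRank (pvNorm x) := by
            intro x hx
            unfold pvRank; rw [if_neg (hAx x hx), if_neg (hBx x hx), if_neg (hCx x hx)]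
          have hge3 : 3 ≤ statuses.foldl (fun a s => min a (pvRank (pvNorm s))) 3 :=
            le_foldl_min hno2 (by omega)
          rw [if_neg hA, if_neg hB, if_neg hC,
            if_neg (by omega : ¬ statuses.foldl (fun a s => min a (pvRank (pvNorm s))) 3 = 0),
            if_neg (by omega : ¬ statuses.foldl (fun a s => min a (pvRank (pvNorm s))) 3 = 1),
            if_neg (by omega : ¬ statuses.foldl (fun a s => min a (pvRank (pvNorm s))) 3 = 2)]
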